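-- pv_equiv track=rewrite | github.com/matheuscordeiro/random-problems | Cracking the Coding Interview/Cap 16/16.20_t9.py | map_number_words
-- ===== SOURCE A (Python) =====
-- import string
--
-- PHONE = {
--     "0": "",
--     "1": "",
--     "2": "abc",
--     "3": "def",
--     "4": "ghi",
--     "5": "jkl",
--     "6": "mno",
--     "7": "pqrs",
--     "8": "tuv",
--     "9": "wxyz"
-- }
--
-- def convert_digit_to_letter():
--     letters = {}
--     for letter in string.ascii_lowercase:
--         for key, value in PHONE.items():
--             if letter in value:
--                 letters[letter] = key
--
--     return letters
--
-- def map_number_words(words):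
--     letters = convert_digit_to_letter()
--     number_words = {}
--     for word in words:
--         number = ""
--         for letter in word:
--             number += letters[letter]
--
--         if number_words.get(number):
--             number_words[number].append(word)
--         else:
--             number_words[number] = [word]
--
--     return number_words
-- ===== SOURCE B (Python) =====
-- def map_number_words(words):
--     t9 = {chr(97 + i): str(2 + i // 3) if i < 15 else "7" if i < 19 else "8" if i < 22 else "9"
--           for i in range(26)}
--     pairs = [("".join(t9[c] for c in w), w) for w in words]
--     order = []
--     for k, _ in pairs:
--         if k not in order:
--             order.append(k)
--     return {k: [w for kk, w in pairs if kk == k] for k in order}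
-- ===== Notes on version B (the rewrite author's own statement) =====
-- stated objective: alternative
-- what changed: A builds a letter-to-digit dict and groups words into a dict incrementally in one pass; B computes each word's T9 key arithmetically from the character code, deduplicates the keys in first-occurrence order, and builds each group by filtering the (key, word) pairs per distinct key.
import Mathlib
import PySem

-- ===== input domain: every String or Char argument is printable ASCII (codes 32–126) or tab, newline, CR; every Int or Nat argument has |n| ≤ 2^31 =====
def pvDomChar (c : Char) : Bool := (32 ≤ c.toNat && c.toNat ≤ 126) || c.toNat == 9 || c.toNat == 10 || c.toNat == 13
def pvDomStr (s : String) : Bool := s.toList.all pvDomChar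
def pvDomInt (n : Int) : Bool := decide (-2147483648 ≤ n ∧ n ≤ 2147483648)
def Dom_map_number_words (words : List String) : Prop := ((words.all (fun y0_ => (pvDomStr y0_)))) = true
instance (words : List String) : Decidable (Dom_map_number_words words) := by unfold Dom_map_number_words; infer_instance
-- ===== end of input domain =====

-- B replaces A's incremental dict group-by with: arithmetic T9 key per word, one dedup pass
-- for key order, then a per-key filter comprehension (objective: alternative decomposition).

-- ===== PORT A =====
def pvPhone : List (String × String) :=
  [("0", ""), ("1", ""), ("2", "abc"), ("3", "def"), ("4", "ghi"), ("5", "jkl"),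
   ("6", "mno"), ("7", "pqrs"), ("8", "tuv"), ("9", "wxyz")]

-- 'letter in value' is ported as char-list membership (exact: letter is a single char)
def convert_digit_to_letter : PySem.Dict Char String :=
  "abcdefghijklmnopqrstuvwxyz".toList.foldl
    (fun d letter =>
      pvPhone.foldl (fun d kv => if kv.2.toList.contains letter then d.insert letter kv.1 else d) d)
    PySem.Dict.empty

-- number += letters[letter]; string concatenation ported on List Char (exact); KeyError
-- (missing key) is excluded by Pre_, the port defaults to "" there.
def pvNumberA (letters : PySem.Dict Char String) (w : String) : String :=
  String.ofList (w.toList.foldl (fun acc c => acc ++ ((letters.get? c).getD "").toList) [])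

def map_number_words (words : List String) : List (String × List String) :=
  (words.foldl
    (fun d w =>
      let number := pvNumberA convert_digit_to_letter w
      match d.get? number with
      | some l => if l.isEmpty then d.insert number [w] else d.insert number (l ++ [w])
      | none => d.insert number [w])
    PySem.Dict.empty).items

-- ===== PORT B =====
-- t9 dict comprehension over range(26); chr(97+i) is Char.ofNat (exact on this range)
def pvT9 : PySem.Dict Char String :=
  (PySem.List.pyRange 0 26 1).foldl
    (fun d i => d.insert (Char.ofNat (97 + i).toNat)
      (if i < 15 then PySem.Int.toStr (2 + PySem.Int.floordiv i 3)
       else if i < 19 then "7" else if i < 22 then "8" else "9"))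
    PySem.Dict.empty

-- "".join(t9[c] for c in w), built on List Char (exact); KeyError (missing key) is
-- excluded by Pre_, the port defaults to "" there.
def pvEncWord (w : String) : String :=
  String.ofList (w.toList.flatMap (fun c => ((pvT9.get? c).getD "").toList))

def map_number_words_alt (words : List String) : List (String × List String) :=
  let pairs := words.map (fun w => (pvEncWord w, w))
  let order := PySem.Set.ofList (pairs.map (·.1))
  order.map (fun k => (k, (pairs.filter (fun p => p.1 == k)).map (·.2)))

-- ===== PRECONDITION & SPEC =====
-- Pre_: every character of every word is a lowercase ASCII letter; on any other
-- character A raises KeyError (letters[letter] misses), so those inputs are excluded.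
def Pre_map_number_words (words : List String) : Prop :=
  (words.all (fun w => w.toList.all (fun c => "abcdefghijklmnopqrstuvwxyz".toList.contains c))) = true
instance (words : List String) : Decidable (Pre_map_number_words words) := by
  unfold Pre_map_number_words; infer_instance

def pvWitness_map_number_words : List String := ["tree", "used", "a", ""]

def Spec_map_number_words (words : List String) (out : List (String × List String)) : Prop := out = map_number_words_alt words
instance (words : List String) (out : List (String × List String)) : Decidable (Spec_map_number_words words out) := by unfold Spec_map_number_words; infer_instance

-- ===== CLAIM (what is proved, stated in full; the proofs are below) =====
def Claim_equal_map_number_words : Prop := ∀ (words : List String), Dom_map_number_words words → Pre_map_number_words words → Spec_map_number_words words (map_number_words words)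

-- ===== LEMMAS AND PROOFS =====

theorem letters_eq_t9 : convert_digit_to_letter = pvT9 := by
  set_option maxRecDepth 100000 in decide

theorem word_agree (w : String) :
    pvNumberA convert_digit_to_letter w = pvEncWord w := by
  unfold pvNumberA pvEncWord
  rw [letters_eq_t9]
  apply congrArg
  rw [PySem.List.foldl_append_eq_flatMap, List.nil_append]

-- A's branch on the truthiness of number_words.get(number) is exactly dict.modify,
-- because every value stored is a nonempty list.
theorem foldA_eq_modify (ws : List String) (d : PySem.Dict String (List String))
    (hd : ∀ v ∈ d.values, v ≠ []) :
    ws.foldl (fun d w =>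
      let number := pvNumberA convert_digit_to_letter w
      match d.get? number with
      | some l => if l.isEmpty then d.insert number [w] else d.insert number (l ++ [w])
      | none => d.insert number [w]) d
    = ws.foldl (fun d w => d.modify (pvNumberA convert_digit_to_letter w) [] (· ++ [w])) d := by
  induction ws generalizing d with
  | nil => rfl
  | cons w ws ih =>
    simp only [List.foldl_cons]
    have hmod : ∀ (k : String) (v : List String) (f : List String → List String),
        d.modify k v f = d.insert k (f (d.getD k v)) := fun _ _ _ => PySem.Dict.ext_iff.mpr rfl
    set k := pvNumberA convert_digit_to_letter w with hk
    have hstep : (match d.get? k with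
        | some l => if l.isEmpty then d.insert k [w] else d.insert k (l ++ [w])
        | none => d.insert k [w]) = d.modify k [] (· ++ [w]) := by
      rw [hmod]
      cases hg : d.get? k with
      | none => rw [PySem.Dict.getD_eq_get?_getD, hg]; simp
      | some l =>
        have hl : l ≠ [] := by
          apply hd
          have hmem : (k, l) ∈ d.items := PySem.Dict.mem_items_of_get?_eq_some (d := d) hg
          simpa only [PySem.Dict.values] using List.mem_map_of_mem hmem
        rw [PySem.Dict.getD_eq_get?_getD, hg]
        simp [List.isEmpty_iff, hl]

    rw [hstep]
    apply ih
    intro v hv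
    rw [hmod] at hv
    rcases PySem.Dict.mem_values_insert _ _ _ _ hv with h1 | h1
    · subst h1; simp
    · exact hd v h1

theorem map_number_words_spec : Claim_equal_map_number_words := by
  intro words _ hpre
  unfold Spec_map_number_words map_number_words map_number_words_alt
  have hw : ∀ w ∈ words, pvNumberA convert_digit_to_letter w = pvEncWord w :=
    fun w _ => word_agree w
  -- rewrite A's loop as a modify-fold over (key, word) pairs
  rw [foldA_eq_modify _ _ (by simp [PySem.Dict.values, PySem.Dict.empty])]
  have hfold : words.foldl (fun d w => d.modify (pvNumberA convert_digit_to_letter w) [] (· ++ [w])) PySem.Dict.empty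
      = (words.map (fun w => (pvEncWord w, w))).foldl (fun d p => d.modify p.1 [] (· ++ [p.2])) PySem.Dict.empty := by
    rw [List.foldl_map]
    apply PySem.List.foldl_congr_mem
    intro d w hmem
    rw [hw w hmem]
  rw [hfold]
  set pairs := words.map (fun w => (pvEncWord w, w)) with hpairs
  have hnd : ((pairs.foldl (fun d p => d.modify p.1 [] (· ++ [p.2])) PySem.Dict.empty).keys).Nodup := by
    exact PySem.Dict.nodup_keys_foldl_modify_key pairs (·.1) [] (fun d p => (· ++ [p.2])) PySem.Dict.empty PySem.Dict.nodup_keys_empty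
  rw [PySem.Dict.items_eq_map_keys _ hnd []]
  rw [PySem.Dict.keys_foldl_modify_key]
  have hkeys : PySem.Set.update (PySem.Dict.empty : PySem.Dict String (List String)).keys (pairs.map (·.1))
      = PySem.Set.ofList (pairs.map (·.1)) := rfl
  rw [hkeys]
  apply List.map_congr_left
  intro k _
  rw [PySem.Dict.getD_foldl_modify_append]
  simp [PySem.Dict.getD_empty]
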